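-- pv_equiv track=rewrite | github.com/SpoonFish/Reversi-Project | Stage2/flask_game_engine.py | execute_move
-- ===== SOURCE A (Python) =====
-- def execute_move(colour,coord,board):
--     """
--     Updates the board after a player places a counter at the given coordinates.
--     Flips outflanked opponent counters according to the standard rules of Reversi.
--
--     Parameters:
--         colour (str): The colour of the counters of the player making the move
--         coord (list[int,int]): Contains the coordinates where the player wants to place their counter
--         board (list[list[str]]): The board containing the state of the game that will be updated
--
--
--     Returns:
--         list[list[str]]: The updated state of the board
--     """
--
--     # Convert to list indices
--     x = coord[0] - 1
--     y = coord[1] - 1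
--
--     # Set the cell selected by the player to a counter of their colour
--     board[y][x] = colour
--
--     # Stores a set of directions vectors which will act as displacements
--     # from the position of the newly placed counter to check which surrounding counters to
--     # switch from the opponent's colour to the current player's colour when they are outflanked
--     valid_directions = [(-1,-1),(0,-1),(1,-1),(-1,0),(1,0),(-1,1),(0,1),(1,1)]
--
--     directions_to_remove = []
--     cells_to_flip = []
--
--     for step in range(1,8):
--         # Remove all direction vectors that were confirmed to not lead to valid
--         # outflanked cells in the last iteration
--         for d in directions_to_remove:
--             valid_directions.remove(d)
--
--         # Reset the list so that directions are not removed twice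
--         directions_to_remove.clear()
--
--         for direction in valid_directions:
--             # Get the change in position from the newly placed counter
--             dx = direction[0]*step
--             dy = direction[1]*step
--
--             # Do not check the cell if the position to be searched is outside the board
--             if 0 > x+dx or x+dx >= 8 or 0 > y+dy or y+dy >= 8:
--                 continue
--
--             # Get the status of cell being checked
--             check_cell = board[y + dy][x + dx]
--
--             # An empty cell reached before reaching another counter of the same colour
--             # means that there are no coutners outflanked in this direction
--             if check_cell == "None ":
--                 directions_to_remove.append(direction)
--
--             # Checks if a counter of the same colour is reached
--             elif check_cell == colour:
--                 # Adds the positions of the cells in a line between the newly added counter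
--                 # and the discovered counter of the same colour (if any) to a list
--                 # of positions of counters that have been outflanked
--                 for i in range(1, step):
--                     cells_to_flip.append((x+direction[0]*i,y+direction[1]*i))
--                 directions_to_remove.append(direction)
--
--     # Switch the colour of the counters in the cells that were
--     # outflanked by the newly added counter
--     for cell_coords in cells_to_flip:
--         x = cell_coords[0]
--         y = cell_coords[1]
--
--         # Toggle the colour of the counter at that position
--         board[y][x] = "Dark " if board[y][x] == "Light" else "Light"
--
--     return board
-- ===== SOURCE B (Python) =====
-- def execute_move(colour, coord, board):
--     """Per-direction ray walk: for each of the 8 directions, step outward from the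
--     placed counter through the fixed 8x8 window; a "None " cell discards the ray, a
--     counter of the mover's colour commits every position strictly between the two.
--     Mutates board in place like the original."""
--     x = coord[0] - 1
--     y = coord[1] - 1
--     board[y][x] = colour
--
--     flips = []
--     for dx, dy in ((-1, -1), (0, -1), (1, -1), (-1, 0), (1, 0), (-1, 1), (0, 1), (1, 1)):
--         for i in range(1, 8):
--             nx = x + dx * i
--             ny = y + dy * i
--             if not (0 <= nx < 8 and 0 <= ny < 8):
--                 continue
--             cell = board[ny][nx]
--             if cell == "None ":
--                 break
--             if cell == colour:
--                 flips.extend((x + dx * j, y + dy * j) for j in range(1, i))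
--                 break
--
--     for fx, fy in flips:
--         board[fy][fx] = "Dark " if board[fy][fx] == "Light" else "Light"
--     return board
-- ===== Notes on version B (the rewrite author's own statement) =====
-- stated objective: simpler
-- what changed: Replaces A's simultaneous step-by-step frontier over all 8 directions with valid_directions/directions_to_remove bookkeeping and per-step flip collection by an independent ray walk per direction that commits the positions between the placed counter and the first same-colour counter it meets.
import Mathlib
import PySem

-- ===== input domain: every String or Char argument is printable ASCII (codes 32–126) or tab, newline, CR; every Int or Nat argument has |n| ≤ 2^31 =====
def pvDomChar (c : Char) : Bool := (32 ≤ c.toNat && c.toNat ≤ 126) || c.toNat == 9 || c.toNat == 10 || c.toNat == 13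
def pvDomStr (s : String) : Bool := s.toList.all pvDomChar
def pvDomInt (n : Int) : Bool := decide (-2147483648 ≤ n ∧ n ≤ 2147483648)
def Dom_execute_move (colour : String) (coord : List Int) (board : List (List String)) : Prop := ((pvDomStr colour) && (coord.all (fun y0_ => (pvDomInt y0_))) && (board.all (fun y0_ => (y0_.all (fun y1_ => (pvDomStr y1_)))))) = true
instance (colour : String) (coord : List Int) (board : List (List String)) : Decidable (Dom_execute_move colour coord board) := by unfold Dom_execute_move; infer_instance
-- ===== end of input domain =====

-- B replaces A's simultaneous frontier over all 8 directions (with valid_directions /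
-- directions_to_remove bookkeeping) by an independent ray walk per direction; same return
-- value, and both Pythons mutate `board` in place identically (equivalence is about the
-- returned board, which is that same object).

-- ===== PORT A =====
-- shared cell access helpers: Python board[y][x] reads/writes; total via pySetD/pyGetD,
-- exact wherever Python does not raise (Pre_ keeps indices in range)
def pvGetCell (b : List (List String)) (y x : Int) : String :=
  PySem.List.pyGetD (PySem.List.pyGetD b y []) x ""

def pvSetCell (b : List (List String)) (y x : Int) (v : String) : List (List String) :=
  PySem.List.pySetD b y (PySem.List.pySetD (PySem.List.pyGetD b y []) x v)

-- board[y][x] = "Dark " if board[y][x] == "Light" else "Light"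
def pvToggle (b : List (List String)) (c : Int × Int) : List (List String) :=
  pvSetCell b c.2 c.1 (if pvGetCell b c.2 c.1 = "Light" then "Dark " else "Light")

def pvDirs : List (Int × Int) := [(-1,-1),(0,-1),(1,-1),(-1,0),(1,0),(-1,1),(0,1),(1,1)]

-- body of A's `for direction in valid_directions:` loop; acc = (directions_to_remove, cells_to_flip)
def pvStepDir (colour : String) (x y : Int) (b : List (List String)) (step : Int)
    (acc : List (Int × Int) × List (Int × Int)) (dir : Int × Int) :
    List (Int × Int) × List (Int × Int) :=
  let dx := dir.1 * step
  let dy := dir.2 * step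
  if 0 > x + dx ∨ x + dx ≥ 8 ∨ 0 > y + dy ∨ y + dy ≥ 8 then acc
  else
    let check := pvGetCell b (y + dy) (x + dx)
    if check = "None " then (acc.1 ++ [dir], acc.2)
    else if check = colour then
      (acc.1 ++ [dir],
       acc.2 ++ (PySem.List.pyRange 1 step).map (fun i => (x + dir.1 * i, y + dir.2 * i)))
    else acc

-- body of A's `for step in range(1,8):` loop; st = (valid_directions, directions_to_remove, cells_to_flip)
def pvStep (colour : String) (x y : Int) (b : List (List String))
    (st : List (Int × Int) × List (Int × Int) × List (Int × Int)) (step : Int) :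
    List (Int × Int) × List (Int × Int) × List (Int × Int) :=
  let valid := st.2.1.foldl (fun v d => (PySem.List.remove? v d).getD v) st.1
  let r := valid.foldl (pvStepDir colour x y b step) ([], st.2.2)
  (valid, r.1, r.2)

def execute_move (colour : String) (coord : List Int) (board : List (List String)) :
    List (List String) :=
  let x := PySem.List.pyGetD coord 0 0 - 1
  let y := PySem.List.pyGetD coord 1 0 - 1
  let b := pvSetCell board y x colour
  let st := (PySem.List.pyRange 1 8).foldl (pvStep colour x y b) (pvDirs, [], [])
  st.2.2.foldl pvToggle b

-- ===== PORT B =====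
-- per-direction ray walk of Source B: `for i in range(1, 8)` with continue/break; fuel = remaining iterations
def pvRay (colour : String) (x y dx dy : Int) (b : List (List String)) :
    Nat → Int → List (Int × Int)
  | 0, _ => []
  | n + 1, i =>
    let nx := x + dx * i
    let ny := y + dy * i
    if ¬(0 ≤ nx ∧ nx < 8 ∧ 0 ≤ ny ∧ ny < 8) then pvRay colour x y dx dy b n (i + 1)
    else
      let cell := pvGetCell b ny nx
      if cell = "None " then []
      else if cell = colour then
        (PySem.List.pyRange 1 i).map (fun j => (x + dx * j, y + dy * j))
      else pvRay colour x y dx dy b n (i + 1)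

def execute_move_alt (colour : String) (coord : List Int) (board : List (List String)) :
    List (List String) :=
  let x := PySem.List.pyGetD coord 0 0 - 1
  let y := PySem.List.pyGetD coord 1 0 - 1
  let b := pvSetCell board y x colour
  let flips := pvDirs.foldl (fun fl d => fl ++ pvRay colour x y d.1 d.2 b 7 1) []
  flips.foldl pvToggle b

-- ===== PRECONDITION & SPEC =====
-- Pre_ excludes exactly the inputs on which A raises before its scan: a missing coordinate
-- (IndexError on coord[0]/coord[1]) or a placement write board[y][x] = colour out of Python's
-- (wraparound) range. A can still raise *during* the scan/flip phase on boards whose rows are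
-- too short; on such inputs both ports compute with the same total PySem-defaulted reads and
-- are proved equal there too, while the behavioural claim about the Pythons is where A returns.
def Pre_execute_move (colour : String) (coord : List Int) (board : List (List String)) : Prop :=
  2 ≤ coord.length ∧
  PySem.Raise.InRange board.length (coord.getD 1 0 - 1) ∧
  PySem.Raise.InRange (PySem.List.pyGetD board (coord.getD 1 0 - 1) []).length
    (coord.getD 0 0 - 1)

instance (colour : String) (coord : List Int) (board : List (List String)) :
    Decidable (Pre_execute_move colour coord board) := by
  unfold Pre_execute_move; infer_instance

def pvWitness_execute_move : String × List Int × List (List String) :=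
  ("Dark ", [4, 3],
   [["None ", "None ", "None ", "None ", "None ", "None ", "None ", "None "],
    ["None ", "None ", "None ", "None ", "None ", "None ", "None ", "None "],
    ["None ", "None ", "None ", "Light", "None ", "None ", "None ", "None "],
    ["None ", "None ", "None ", "Dark ", "Light", "None ", "None ", "None "],
    ["None ", "None ", "None ", "Light", "Dark ", "None ", "None ", "None "],
    ["None ", "None ", "None ", "None ", "None ", "None ", "None ", "None "],
    ["None ", "None ", "None ", "None ", "None ", "None ", "None ", "None "],
    ["None ", "None ", "None ", "None ", "None ", "None ", "None ", "None "]])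

def Spec_execute_move (colour : String) (coord : List Int) (board : List (List String))
    (out : List (List String)) : Prop := out = execute_move_alt colour coord board

instance (colour : String) (coord : List Int) (board : List (List String))
    (out : List (List String)) : Decidable (Spec_execute_move colour coord board out) := by
  unfold Spec_execute_move; infer_instance

-- ===== CLAIM (what is proved, stated in full; the proofs are below) =====
def Claim_equal_execute_move : Prop := ∀ (colour : String) (coord : List Int) (board : List (List String)), Dom_execute_move colour coord board → Pre_execute_move colour coord board → Spec_execute_move colour coord board (execute_move colour coord board)

-- ===== LEMMAS AND PROOFS =====

-- abstract per-direction scan data (proof-side only)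
def pvInB (x y : Int) (d : Int × Int) (t : Int) : Bool :=
  decide (0 ≤ x + d.1 * t ∧ x + d.1 * t < 8 ∧ 0 ≤ y + d.2 * t ∧ y + d.2 * t < 8)

def pvCellAt (b : List (List String)) (x y : Int) (d : Int × Int) (t : Int) : String :=
  pvGetCell b (y + d.2 * t) (x + d.1 * t)

def pvStop (colour : String) (b : List (List String)) (x y : Int) (d : Int × Int) (t : Int) : Bool :=
  pvInB x y d t && (pvCellAt b x y d t == "None " || pvCellAt b x y d t == colour)

def pvHit (colour : String) (b : List (List String)) (x y : Int) (d : Int × Int) (t : Int) : Bool :=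
  pvInB x y d t && !(pvCellAt b x y d t == "None ") && (pvCellAt b x y d t == colour)

def pvNoStopB (colour : String) (b : List (List String)) (x y : Int) (s : Int) (d : Int × Int) : Bool :=
  (PySem.List.pyRange 1 s).all (fun t => !pvStop colour b x y d t)

def pvCells (x y : Int) (d : Int × Int) (t : Int) : List (Int × Int) :=
  (PySem.List.pyRange 1 t).map (fun i => (x + d.1 * i, y + d.2 * i))

def pvEmit (colour : String) (b : List (List String)) (x y : Int) (t : Int) (d : Int × Int) :
    List (Int × Int) :=
  if pvHit colour b x y d t && pvNoStopB colour b x y t d then pvCells x y d t else []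

def pvSeg (colour : String) (b : List (List String)) (x y : Int) (d : Int × Int) :
    List (Int × Int) :=
  (PySem.List.pyRange 1 8).flatMap (fun t => pvEmit colour b x y t d)


lemma pv_inner (colour : String) (x y : Int) (b : List (List String)) (step : Int) :
    ∀ (l : List (Int × Int)) (tr fl : List (Int × Int)),
      l.foldl (pvStepDir colour x y b step) (tr, fl)
        = (tr ++ l.filter (fun d => pvStop colour b x y d step),
           fl ++ l.flatMap (fun d =>
             if pvHit colour b x y d step then pvCells x y d step else [])) := by
  intro l
  induction l with
  | nil => intro tr fl; simp
  | cons d l ih =>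
    intro tr fl
    simp only [List.foldl_cons, List.filter_cons, List.flatMap_cons]
    by_cases hib : (0 > x + d.1 * step ∨ x + d.1 * step ≥ 8 ∨ 0 > y + d.2 * step ∨ y + d.2 * step ≥ 8)
    · have hstop : pvStop colour b x y d step = false := by
        simp [pvStop, pvInB]; omega
      have hhit : pvHit colour b x y d step = false := by
        simp [pvHit, pvInB]; omega
      rw [show pvStepDir colour x y b step (tr, fl) d = (tr, fl) by
        simp [pvStepDir, hib]]
      rw [ih]
      simp [hstop, hhit]
    · have hin : pvInB x y d step = true := by simp [pvInB]; omega
      by_cases hn : pvCellAt b x y d step = "None "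
      · have hstop : pvStop colour b x y d step = true := by simp [pvStop, hin, hn]
        have hhit : pvHit colour b x y d step = false := by simp [pvHit, hn]
        rw [show pvStepDir colour x y b step (tr, fl) d = (tr ++ [d], fl) by
          simp [pvStepDir, hib, pvCellAt] at hn ⊢; simp [hn]]
        rw [ih]
        simp [hstop, hhit]
      · by_cases hc : pvCellAt b x y d step = colour
        · have hn2 : ¬ colour = "None " := by rw [← hc]; exact hn
          have hstop : pvStop colour b x y d step = true := by simp [pvStop, hin, hc]
          have hhit : pvHit colour b x y d step = true := by simp [pvHit, hin, hc, hn2]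
          rw [show pvStepDir colour x y b step (tr, fl) d
              = (tr ++ [d], fl ++ pvCells x y d step) by
            simp [pvCellAt] at hc
            simp [pvStepDir, hib, pvCells, hc, hn2]]
          rw [ih]
          simp [hstop, hhit]
        · have hstop : pvStop colour b x y d step = false := by simp [pvStop, hn, hc]
          have hhit : pvHit colour b x y d step = false := by simp [pvHit, hn, hc]
          rw [show pvStepDir colour x y b step (tr, fl) d = (tr, fl) by
            simp [pvStepDir, hib, pvCellAt] at hn hc ⊢; simp [hn, hc]]
          rw [ih]
          simp [hstop, hhit]

lemma pv_removeD_eq_erase (v : List (Int × Int)) (d : Int × Int) :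
    (PySem.List.remove? v d).getD v = v.erase d := by
  by_cases h : d ∈ v
  · rw [PySem.List.remove?_eq_some_erase v d h]; rfl
  · rw [(PySem.List.remove?_eq_none_iff v d).mpr h, List.erase_of_not_mem h]; rfl

lemma pv_remove (p q : (Int × Int) → Bool) :
    (pvDirs.filter q).foldl (fun v d => (PySem.List.remove? v d).getD v) (pvDirs.filter p)
      = pvDirs.filter (fun d => p d && !q d) := by
  have hf : (fun (v : List (Int × Int)) d => (PySem.List.remove? v d).getD v) = List.erase :=
    funext fun v => funext fun d => pv_removeD_eq_erase v d
  rw [hf, ← List.diff_eq_foldl,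
    List.Nodup.diff_eq_filter (List.Nodup.filter p (by decide)), List.filter_filter]
  apply List.filter_congr
  intro d hd
  by_cases hq : q d <;> simp [List.mem_filter, hd, hq]

lemma pv_filter_flatMap {α β : Type} (r : α → Bool) (f : α → List β) :
    ∀ l : List α, (l.filter r).flatMap f = l.flatMap (fun a => if r a then f a else [])
  | [] => rfl
  | a :: l => by
    by_cases h : r a <;>
      simp [h, List.flatMap_cons, pv_filter_flatMap r f l]

lemma pv_step_shape (colour : String) (x y : Int) (b : List (List String))
    (p q : (Int × Int) → Bool) (F : List (Int × Int)) (step : Int) :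
    pvStep colour x y b (pvDirs.filter p, pvDirs.filter q, F) step
      = (pvDirs.filter (fun d => p d && !q d),
         pvDirs.filter (fun d => (p d && !q d) && pvStop colour b x y d step),
         F ++ pvDirs.flatMap (fun d =>
           if (p d && !q d) && pvHit colour b x y d step then pvCells x y d step else [])) := by
  unfold pvStep
  simp only [pv_remove, pv_inner, List.filter_filter, pv_filter_flatMap]
  refine congrArg₂ _ rfl (congrArg₂ _ ?_ (congrArg _ ?_))
  · apply List.filter_congr; intro d _
    by_cases h1 : p d && !q d <;> simp [h1]
  · apply List.flatMap_congr; intro d _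
    by_cases h1 : p d && !q d <;> simp [h1]

lemma pv_noStop_succ (colour : String) (b : List (List String)) (x y : Int) (k : Int)
    (hk : 1 ≤ k) (d : Int × Int) :
    pvNoStopB colour b x y (k + 1) d
      = (pvNoStopB colour b x y k d && !pvStop colour b x y d k) := by
  unfold pvNoStopB
  rw [PySem.List.pyRange_one_succ_right hk, List.all_append]
  simp

lemma pv_loop (colour : String) (x y : Int) (b : List (List String)) :
    ∀ k : Nat, 1 ≤ k → k ≤ 7 →
      (PySem.List.pyRange 1 ((k : Int) + 1)).foldl (pvStep colour x y b) (pvDirs, [], [])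
        = (pvDirs.filter (pvNoStopB colour b x y (k : Int)),
           pvDirs.filter (fun d => pvNoStopB colour b x y (k : Int) d && pvStop colour b x y d (k : Int)),
           (PySem.List.pyRange 1 ((k : Int) + 1)).flatMap
             (fun t => pvDirs.flatMap (pvEmit colour b x y t))) := by
  intro k
  induction k with
  | zero => omega
  | succ k ih =>
    intro _ hk7
    by_cases hk1 : k = 0
    · subst hk1
      have h12 : PySem.List.pyRange (1:Int) (2:Int) = [1] := by decide
      push_cast
      rw [h12]
      simp only [List.foldl_cons, List.foldl_nil, List.flatMap_cons, List.flatMap_nil,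
        List.append_nil]
      rw [show (pvDirs : List (Int × Int)) = pvDirs.filter (fun _ => true) by simp,
        show ([] : List (Int × Int)) = pvDirs.filter (fun _ => false) by simp]
      rw [pv_step_shape]
      have hno : ∀ d : Int × Int, pvNoStopB colour b x y 1 d = true := by
        intro d; unfold pvNoStopB
        rw [show PySem.List.pyRange (1:Int) 1 = [] by decide]
        rfl
      refine congrArg₂ _ ?_ (congrArg₂ _ ?_ ?_)
      · apply List.filter_congr; intro d _; simp [hno d]
      · apply List.filter_congr; intro d _; simp [hno d]
      · apply List.flatMap_congr; intro d _
        unfold pvEmit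
        simp [hno d, Bool.and_comm]
    · have hk : 1 ≤ k := by omega
      have ihs := ih hk (by omega)
      have hsucc : ((k : Int) + 1) = ((k : Int)) + 1 := rfl
      have hrange : PySem.List.pyRange (1:Int) ((k:Int) + 1 + 1)
          = PySem.List.pyRange (1:Int) ((k:Int) + 1) ++ [(k:Int) + 1] :=
        PySem.List.pyRange_one_succ_right (by omega)
      push_cast
      rw [hrange, List.foldl_append, ihs]
      simp only [List.foldl_cons, List.foldl_nil]
      rw [pv_step_shape]
      have hptw : ∀ d : Int × Int,
          (pvNoStopB colour b x y (k:Int) d && !(pvNoStopB colour b x y (k:Int) d && pvStop colour b x y d (k:Int)))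
            = pvNoStopB colour b x y ((k:Int) + 1) d := by
        intro d
        rw [pv_noStop_succ colour b x y (k:Int) (by omega)]
        cases hA : pvNoStopB colour b x y (k:Int) d <;>
          cases hB : pvStop colour b x y d (k:Int) <;> simp
      refine congrArg₂ _ ?_ (congrArg₂ _ ?_ ?_)
      · apply List.filter_congr; intro d _; exact hptw d
      · apply List.filter_congr; intro d _; rw [hptw d]
      · rw [List.flatMap_append]
        refine congrArg₂ _ rfl ?_
        simp only [List.flatMap_cons, List.flatMap_nil, List.append_nil]
        apply List.flatMap_congr; intro d _
        unfold pvEmit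
        rw [← hptw d]
        cases hA : pvNoStopB colour b x y (k:Int) d <;>
          cases hB : pvStop colour b x y d (k:Int) <;>
          cases hC : pvHit colour b x y d ((k:Int)+1) <;> simp

lemma pv_hit_false_of_stop_false (colour : String) (b : List (List String)) (x y : Int)
    (d : Int × Int) (t : Int) (h : pvStop colour b x y d t = false) :
    pvHit colour b x y d t = false := by
  unfold pvStop at h
  unfold pvHit
  cases hin : pvInB x y d t <;> simp [hin] at h ⊢
  · tauto

lemma pv_flatMap_single {β : Type} :
    ∀ (L : List Int), L.Nodup → ∀ (f : Int → List β) (t0 : Int), t0 ∈ L →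
      (∀ t ∈ L, t ≠ t0 → f t = []) → L.flatMap f = f t0
  | [], _, _, _, h, _ => by simp at h
  | a :: L, hnd, f, t0, hmem, hz => by
    rcases List.mem_cons.mp hmem with h | h
    · subst h
      have : L.flatMap f = [] := List.flatMap_eq_nil_iff.mpr (fun t ht =>
        hz t (List.mem_cons_of_mem _ ht) (fun he => ((List.nodup_cons.mp hnd).1 (he ▸ ht))))
      simp [this]
    · have ha : f a = [] := hz a (List.mem_cons_self) (fun he => ((List.nodup_cons.mp hnd).1 (he ▸ h)))
      simp [ha, pv_flatMap_single L (List.nodup_cons.mp hnd).2 f t0 h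
        (fun t ht hne => hz t (List.mem_cons_of_mem _ ht) hne)]

lemma pv_ray_eq (colour : String) (x y : Int) (b : List (List String)) (d : Int × Int) :
    ∀ (n : Nat) (i : Int),
      i = 8 - (n : Int) → 1 ≤ i →
      (∀ t, 1 ≤ t → t < i → pvStop colour b x y d t = false) →
      pvRay colour x y d.1 d.2 b n i = pvSeg colour b x y d := by
  intro n
  induction n with
  | zero =>
    intro i hi _ hns
    unfold pvRay pvSeg
    refine (List.flatMap_eq_nil_iff.mpr ?_).symm
    intro t ht
    rw [PySem.List.mem_pyRange_one] at ht
    have : pvStop colour b x y d t = false := hns t ht.1 (by omega)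
    unfold pvEmit
    rw [pv_hit_false_of_stop_false colour b x y d t this]
    simp
  | succ n ih =>
    intro i hi h1i hns
    simp only [pvRay]
    by_cases hb : (0 ≤ x + d.1 * i ∧ x + d.1 * i < 8 ∧ 0 ≤ y + d.2 * i ∧ y + d.2 * i < 8)
    · have hin : pvInB x y d i = true := by simp [pvInB, hb]
      rw [if_neg (by simpa using hb)]
      by_cases hN : pvGetCell b (y + d.2 * i) (x + d.1 * i) = "None "
      · rw [if_pos hN]
        refine (List.flatMap_eq_nil_iff.mpr ?_).symm
        intro t ht
        rw [PySem.List.mem_pyRange_one] at ht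
        unfold pvEmit
        rcases lt_trichotomy t i with hlt | heq | hgt
        · rw [pv_hit_false_of_stop_false colour b x y d t (hns t ht.1 hlt)]; simp
        · subst heq
          have : pvHit colour b x y d t = false := by
            unfold pvHit
            simp [pvCellAt, hN]
          rw [this]; simp
        · have hstopi : pvStop colour b x y d i = true := by
            unfold pvStop
            simp [hin, pvCellAt, hN]
          have : pvNoStopB colour b x y t d = false := by
            unfold pvNoStopB
            rw [List.all_eq_false]
            exact ⟨i, PySem.List.mem_pyRange_one.mpr ⟨h1i, hgt⟩, by simp [hstopi]⟩
          rw [this]; simp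
      · rw [if_neg hN]
        by_cases hC : pvGetCell b (y + d.2 * i) (x + d.1 * i) = colour
        · rw [if_pos hC]
          have hi8 : i < 8 := by omega
          have hn2 : ¬ colour = "None " := by rw [← hC]; exact hN
          have hnostopb : pvNoStopB colour b x y i d = true := by
            unfold pvNoStopB
            rw [List.all_eq_true]
            intro t ht
            rw [PySem.List.mem_pyRange_one] at ht
            simp [hns t ht.1 ht.2]
          have hhit : pvHit colour b x y d i = true := by
            unfold pvHit
            simp [hin, pvCellAt, hC, hn2]
          have hstopi : pvStop colour b x y d i = true := by
            unfold pvStop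
            simp [hin, pvCellAt, hC]
          unfold pvSeg
          rw [pv_flatMap_single _ (PySem.List.nodup_pyRange_one 1 8) _ i
            (PySem.List.mem_pyRange_one.mpr ⟨h1i, hi8⟩) ?_]
          · unfold pvEmit pvCells
            rw [hhit, hnostopb]
            simp
          · intro t ht hne
            rw [PySem.List.mem_pyRange_one] at ht
            unfold pvEmit
            rcases lt_trichotomy t i with hlt | heq | hgt
            · rw [pv_hit_false_of_stop_false colour b x y d t (hns t ht.1 hlt)]; simp
            · exact absurd heq hne
            · have : pvNoStopB colour b x y t d = false := by
                unfold pvNoStopB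
                rw [List.all_eq_false]
                exact ⟨i, PySem.List.mem_pyRange_one.mpr ⟨h1i, hgt⟩, by simp [hstopi]⟩
              rw [this]; simp
        · rw [if_neg hC]
          apply ih (i + 1) (by omega) (by omega)
          intro t h1t hti
          rcases lt_or_eq_of_le (by omega : t ≤ i) with hlt | heq
          · exact hns t h1t hlt
          · subst heq
            unfold pvStop
            simp [pvCellAt, hN, hC]
    · rw [if_pos (by simpa using hb)]
      apply ih (i + 1) (by omega) (by omega)
      intro t h1t hti
      rcases lt_or_eq_of_le (by omega : t ≤ i) with hlt | heq
      · exact hns t h1t hlt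
      · subst heq
        have : pvInB x y d t = false := by simp [pvInB]; omega
        unfold pvStop
        rw [this]
        rfl

lemma pv_flatMap_comm {α β γ : Type} (L1 : List α) (L2 : List β) (f : α → β → List γ) :
    (L1.flatMap fun a => L2.flatMap fun b => f a b).Perm
      (L2.flatMap fun b => L1.flatMap fun a => f a b) := by
  induction L1 with
  | nil => simp
  | cons a L1 ih =>
    rw [List.flatMap_cons]
    refine List.Perm.trans (List.Perm.append_left _ ih) ?_
    simp only [List.flatMap_cons]
    exact (List.flatMap_append_perm L2 (fun b => f a b) (fun b => L1.flatMap fun a => f a b))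

lemma pv_pyIdx_lt {L : Nat} {i : Int} {n : Nat} (h : PySem.List.pyIdx? L i = some n) : n < L := by
  unfold PySem.List.pyIdx? at h
  split_ifs at h <;> simp at h <;> omega

def pvTog1 (r : List String) (x : Int) : List String :=
  match PySem.List.pyIdx? r.length x with
  | none => r
  | some m => r.set m (if r.getD m "" = "Light" then "Dark " else "Light")

lemma pvTog1_len (r : List String) (x : Int) : (pvTog1 r x).length = r.length := by
  unfold pvTog1
  cases h : PySem.List.pyIdx? r.length x <;> simp

lemma pv_toggle_view (b : List (List String)) (c : Int × Int) :
    pvToggle b c = match PySem.List.pyIdx? b.length c.2 with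
      | none => b
      | some n => b.set n (pvTog1 (b.getD n []) c.1) := by
  unfold pvToggle pvSetCell pvGetCell pvTog1
  cases h : PySem.List.pyIdx? b.length c.2 with
  | none =>
    simp [PySem.List.pySetD, PySem.List.pySet?, h]
  | some n =>
    have hn : n < b.length := pv_pyIdx_lt h
    have hrow : PySem.List.pyGetD b c.2 [] = b.getD n [] := by
      simp [PySem.List.pyGetD, PySem.List.pyGet?, h, List.getD_eq_getElem?_getD]
    rw [hrow]
    cases h2 : PySem.List.pyIdx? (b.getD n []).length c.1 with
    | none =>
      rw [List.getD_eq_getElem?_getD] at h2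
      simp [PySem.List.pySetD, PySem.List.pySet?, PySem.List.pyGetD, PySem.List.pyGet?, h, h2,
        List.getD_eq_getElem?_getD]
    | some m =>
      rw [List.getD_eq_getElem?_getD] at h2
      simp [PySem.List.pySetD, PySem.List.pySet?, PySem.List.pyGetD, PySem.List.pyGet?, h, h2,
        List.getD_eq_getElem?_getD]

lemma pv_toggle_len (b : List (List String)) (c : Int × Int) :
    (pvToggle b c).length = b.length := by
  rw [pv_toggle_view]
  cases h : PySem.List.pyIdx? b.length c.2 <;> simp

lemma pvTog1_of_none {r : List String} {x : Int}
    (h : PySem.List.pyIdx? r.length x = none) : pvTog1 r x = r := by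
  unfold pvTog1; rw [h]

lemma pvTog1_of_some {r : List String} {x : Int} {m : Nat}
    (h : PySem.List.pyIdx? r.length x = some m) :
    pvTog1 r x = r.set m (if r.getD m "" = "Light" then "Dark " else "Light") := by
  unfold pvTog1; rw [h]

lemma pvTog1_comm (r : List String) (x₁ x₂ : Int) :
    pvTog1 (pvTog1 r x₁) x₂ = pvTog1 (pvTog1 r x₂) x₁ := by
  cases h1 : PySem.List.pyIdx? r.length x₁ with
  | none =>
    rw [pvTog1_of_none h1, pvTog1_of_none (show PySem.List.pyIdx? (pvTog1 r x₂).length x₁ = none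
      from by rw [pvTog1_len]; exact h1)]
  | some m₁ =>
    cases h2 : PySem.List.pyIdx? r.length x₂ with
    | none =>
      rw [pvTog1_of_none h2, pvTog1_of_none (show PySem.List.pyIdx? (pvTog1 r x₁).length x₂ = none
        from by rw [pvTog1_len]; exact h2)]
    | some m₂ =>
      have hm₁ : m₁ < r.length := pv_pyIdx_lt h1
      rw [pvTog1_of_some h1, pvTog1_of_some h2,
        pvTog1_of_some (show PySem.List.pyIdx? ((r.set m₁ _).length) x₂ = some m₂
          from by rw [List.length_set]; exact h2),
        pvTog1_of_some (show PySem.List.pyIdx? ((r.set m₂ _).length) x₁ = some m₁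
          from by rw [List.length_set]; exact h1)]
      by_cases hmm : m₁ = m₂
      · subst hmm; rfl
      · simp only [List.getD_eq_getElem?_getD, List.getElem?_set_ne hmm,
          List.getElem?_set_ne (Ne.symm hmm)]
        rw [List.set_comm _ _ hmm]

lemma pv_toggle_of_none {b : List (List String)} {c : Int × Int}
    (h : PySem.List.pyIdx? b.length c.2 = none) : pvToggle b c = b := by
  rw [pv_toggle_view, h]

lemma pv_toggle_of_some {b : List (List String)} {c : Int × Int} {n : Nat}
    (h : PySem.List.pyIdx? b.length c.2 = some n) :
    pvToggle b c = b.set n (pvTog1 (b.getD n []) c.1) := by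
  rw [pv_toggle_view, h]

lemma pv_toggle_comm (b : List (List String)) (c₁ c₂ : Int × Int) :
    pvToggle (pvToggle b c₁) c₂ = pvToggle (pvToggle b c₂) c₁ := by
  cases h1 : PySem.List.pyIdx? b.length c₁.2 with
  | none =>
    rw [pv_toggle_of_none h1, pv_toggle_of_none (show PySem.List.pyIdx? (pvToggle b c₂).length c₁.2
      = none from by rw [pv_toggle_len]; exact h1)]
  | some n₁ =>
    cases h2 : PySem.List.pyIdx? b.length c₂.2 with
    | none =>
      rw [pv_toggle_of_none h2, pv_toggle_of_none (show PySem.List.pyIdx? (pvToggle b c₁).length c₂.2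
        = none from by rw [pv_toggle_len]; exact h2)]
    | some n₂ =>
      have hn₁ : n₁ < b.length := pv_pyIdx_lt h1
      rw [pv_toggle_of_some h1, pv_toggle_of_some h2,
        pv_toggle_of_some (show PySem.List.pyIdx? ((b.set n₁ _).length) c₂.2 = some n₂
          from by rw [List.length_set]; exact h2),
        pv_toggle_of_some (show PySem.List.pyIdx? ((b.set n₂ _).length) c₁.2 = some n₁
          from by rw [List.length_set]; exact h1)]
      by_cases hnn : n₁ = n₂
      · subst hnn
        simp only [List.getD_eq_getElem?_getD, List.getElem?_set_self hn₁, Option.getD_some,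
          List.set_set]
        rw [pvTog1_comm]
      · simp only [List.getD_eq_getElem?_getD, List.getElem?_set_ne hnn,
          List.getElem?_set_ne (Ne.symm hnn)]
        rw [List.set_comm _ _ hnn]

-- ===== VERDICT (by name: the statement is the Claim_ definition above) =====
theorem execute_move_spec : Claim_equal_execute_move := by
  intro colour coord board _hDom _hPre
  unfold Spec_execute_move
  simp only [execute_move, execute_move_alt]
  set x : Int := PySem.List.pyGetD coord 0 0 - 1
  set y : Int := PySem.List.pyGetD coord 1 0 - 1
  set b := pvSetCell board y x colour
  have hA : ((PySem.List.pyRange 1 8).foldl (pvStep colour x y b) (pvDirs, [], [])).2.2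
      = (PySem.List.pyRange 1 8).flatMap (fun t => pvDirs.flatMap (pvEmit colour b x y t)) := by
    have h8 : (8 : Int) = ((7 : Nat) : Int) + 1 := by norm_num
    rw [h8, pv_loop colour x y b 7 (by omega) (by omega)]
  have hB : pvDirs.foldl (fun fl d => fl ++ pvRay colour x y d.1 d.2 b 7 1) []
      = pvDirs.flatMap (pvSeg colour b x y) := by
    rw [PySem.List.foldl_append_eq_flatMap, List.nil_append]
    apply List.flatMap_congr
    intro d _
    exact pv_ray_eq colour x y b d 7 1 (by norm_num) (le_refl 1)
      (fun t h1t ht1 => absurd (lt_of_le_of_lt h1t ht1) (lt_irrefl 1))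
  have hperm : ((PySem.List.pyRange 1 8).flatMap
      (fun t => pvDirs.flatMap (pvEmit colour b x y t))).Perm
      (pvDirs.flatMap (pvSeg colour b x y)) :=
    pv_flatMap_comm (PySem.List.pyRange 1 8) pvDirs (fun t d => pvEmit colour b x y t d)
  rw [hA, hB]
  haveI : RightCommutative pvToggle := ⟨pv_toggle_comm⟩
  exact hperm.foldl_eq b
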